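-- pv_equiv track=rewrite | github.com/erikmetzinfo/tds_db_generator | src/test.py | special_string_comparison
-- ===== SOURCE A (Python) =====
-- def special_string_comparison(string1, string2):
--     reverse_string2 = string2[::-1]
--     string1_ = string1
--     last_pos=0
--     for c in reverse_string2:
--         pos = string1_.rfind(c)
--         if pos > last_pos:
--             last_pos = pos
--             string1_ = string1_[:pos]
--     val = string1[last_pos + 1:].strip()
--     return val
-- ===== SOURCE B (Python) =====
-- def special_string_comparison(string1, string2):
--     last = {c: i for i, c in enumerate(string1)}
--     pos = 0
--     for c in reversed(string2):
--         i = last.get(c, -1)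
--         if i > 0:
--             pos = i
--             break
--     return string1[pos + 1:].strip()
-- ===== Notes on version B (the rewrite author's own statement) =====
-- stated objective: faster
-- what changed: Replace the per-character rfind-and-truncate loop (each step rescans string1) by a last-occurrence dict of string1 built once, then a single reverse scan of string2 stopping at the first char whose last index is > 0.
import Mathlib
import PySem

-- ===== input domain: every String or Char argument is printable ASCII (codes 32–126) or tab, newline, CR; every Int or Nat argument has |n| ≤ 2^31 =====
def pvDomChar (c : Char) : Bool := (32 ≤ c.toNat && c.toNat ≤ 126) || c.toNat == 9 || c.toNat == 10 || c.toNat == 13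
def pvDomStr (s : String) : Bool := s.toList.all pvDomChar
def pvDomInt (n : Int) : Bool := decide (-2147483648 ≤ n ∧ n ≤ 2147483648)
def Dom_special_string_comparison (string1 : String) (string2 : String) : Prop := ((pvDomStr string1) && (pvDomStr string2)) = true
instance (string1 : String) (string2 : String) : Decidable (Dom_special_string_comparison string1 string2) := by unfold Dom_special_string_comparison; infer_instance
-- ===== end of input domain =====

-- B replaces A's per-character rfind-and-truncate loop by a last-occurrence dict of string1
-- built once plus one reverse scan of string2 (objective: faster, O(len1+len2) vs O(len1*len2)).

-- ===== PORT A =====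
-- loop body of A: pos = string1_.rfind(c); if pos > last_pos: update (last_pos, string1_)
def sscStep (st : Int × List Char) (c : Char) : Int × List Char :=
  let pos := PySem.Chars.rfind st.2 [c]
  if pos > st.1 then (pos, PySem.Chars.slice st.2 none (some pos)) else st

def special_string_comparison (string1 : String) (string2 : String) : String :=
  let reverse_string2 := (PySem.List.slice? string2.toList none none (-1)).getD []  -- string2[::-1]; step ≠ 0, never none
  let st := reverse_string2.foldl sscStep (0, string1.toList)                        -- (last_pos, string1_)
  let val := PySem.Chars.strip (PySem.Chars.slice string1.toList (some (st.1 + 1)) none)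
  String.ofList val

-- ===== PORT B =====
-- last = {c: i for i, c in enumerate(string1)}
def sscLastIdx (string1 : List Char) : PySem.Dict Char Int :=
  (PySem.List.enumerate string1 0).foldl (fun d p => d.insert p.2 p.1) PySem.Dict.empty

-- the for-loop with break: first c in r with last.get(c, -1) > 0; default 0
def sscScan (last : PySem.Dict Char Int) (r : List Char) : Int :=
  match r with
  | [] => 0
  | c :: rest => let i := last.getD c (-1); if i > 0 then i else sscScan last rest

def special_string_comparison_alt (string1 : String) (string2 : String) : String :=
  let last := sscLastIdx string1.toList
  let pos := sscScan last string2.toList.reverse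
  String.ofList (PySem.Chars.strip (PySem.Chars.slice string1.toList (some (pos + 1)) none))

-- ===== PRECONDITION & SPEC =====
def Spec_special_string_comparison (string1 : String) (string2 : String) (out : String) : Prop := out = special_string_comparison_alt string1 string2
instance (string1 : String) (string2 : String) (out : String) : Decidable (Spec_special_string_comparison string1 string2 out) := by unfold Spec_special_string_comparison; infer_instance

-- ===== CLAIM (what is proved, stated in full; the proofs are below) =====
def Claim_equal_special_string_comparison : Prop := ∀ (string1 : String) (string2 : String), Dom_special_string_comparison string1 string2 → Spec_special_string_comparison string1 string2 (special_string_comparison string1 string2)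

-- ===== LEMMAS AND PROOFS =====

-- rfind.go unfolding
theorem ssc_go_zero (s sub : List Char) :
    PySem.Chars.rfind.go s sub 0 = if sub.isPrefixOf s then 0 else -1 := by
  simp [PySem.Chars.rfind.go]

theorem ssc_go_succ (s sub : List Char) (j : Nat) :
    PySem.Chars.rfind.go s sub (j+1)
      = if sub.isPrefixOf (s.drop (j+1)) then ((j:Int)+1) else PySem.Chars.rfind.go s sub j := by
  simp [PySem.Chars.rfind.go]

theorem ssc_prefix_singleton_cons (c a : Char) (l : List Char) :
    List.isPrefixOf [c] (a :: l) = (c == a) := by simp [List.isPrefixOf]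

theorem ssc_go_le (s sub : List Char) (j : Nat) : PySem.Chars.rfind.go s sub j ≤ (j : Int) := by
  induction j with
  | zero => rw [ssc_go_zero]; split <;> omega
  | succ n ih => rw [ssc_go_succ]; split <;> omega

-- a single-char rfind is an index into s (or -1), never s.length
theorem ssc_rfind_singleton_lt (s : List Char) (c : Char) :
    PySem.Chars.rfind s [c] < (s.length : Int) := by
  unfold PySem.Chars.rfind
  cases hs : s with
  | nil => simp [ssc_go_zero, List.isPrefixOf]
  | cons a t =>
    have hlen : s.length = t.length + 1 := by rw [hs]; simp
    rw [← hs, hlen, ssc_go_succ]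
    have hdrop : s.drop (t.length + 1) = [] := by
      apply List.drop_eq_nil_of_le; omega
    rw [hdrop]
    simp only [List.isPrefixOf, Bool.false_eq_true, if_false]
    have := ssc_go_le s [c] t.length
    omega

theorem ssc_go_append_lt (s : List Char) (x c : Char) (j : Nat) (hj : j < s.length) :
    PySem.Chars.rfind.go (s ++ [x]) [c] j = PySem.Chars.rfind.go s [c] j := by
  induction j with
  | zero =>
    rw [ssc_go_zero, ssc_go_zero]
    cases s with
    | nil => simp at hj
    | cons a t => simp [ssc_prefix_singleton_cons]
  | succ n ih =>
    rw [ssc_go_succ, ssc_go_succ]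
    have hd : (s ++ [x]).drop (n+1) = s.drop (n+1) ++ [x] := by
      rw [List.drop_append_of_le_length (by omega)]
    rw [hd]
    cases hds : s.drop (n+1) with
    | nil => have := List.length_drop (l := s) (i := n+1); rw [hds] at this; simp at this; omega
    | cons a t =>
      simp only [List.cons_append, ssc_prefix_singleton_cons]
      rw [ih (by omega)]

theorem sscStep_eq (p : Int) (t : List Char) (c : Char) :
    sscStep (p, t) c = if PySem.Chars.rfind t [c] > p
      then (PySem.Chars.rfind t [c], PySem.Chars.slice t none (some (PySem.Chars.rfind t [c])))
      else (p, t) := rfl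

theorem ssc_rfind_append_singleton (s : List Char) (x c : Char) :
    PySem.Chars.rfind (s ++ [x]) [c]
      = if c = x then (s.length : Int) else PySem.Chars.rfind s [c] := by
  cases s with
  | nil =>
    show PySem.Chars.rfind [x] [c] = if c = x then (0 : Int) else PySem.Chars.rfind [] [c]
    by_cases hcx : c = x
    · subst hcx
      simp [PySem.Chars.rfind, PySem.Chars.rfind.go, List.isPrefixOf]
    · simp [PySem.Chars.rfind, PySem.Chars.rfind.go, List.isPrefixOf, hcx]
  | cons a t =>
    unfold PySem.Chars.rfind
    have hlen : ((a :: t) ++ [x]).length = ((a :: t).length) + 1 := by simp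
    have hlc : (a :: t).length = t.length + 1 := by simp
    have hd1 : ((a :: t) ++ [x]).drop (t.length + 1) = [x] := by
      rw [← hlc, List.drop_append_of_le_length (by simp)]; simp
    have hd2 : ((a :: t) ++ [x]).drop (t.length + 1 + 1) = [] := by
      apply List.drop_eq_nil_of_le; simp
    have hd3 : (a :: t).drop (t.length + 1) = [] := by
      apply List.drop_eq_nil_of_le; simp
    rw [hlen, hlc, ssc_go_succ, hd2]
    simp only [List.isPrefixOf, Bool.false_eq_true, if_false]
    rw [ssc_go_succ, hd1, ssc_prefix_singleton_cons]
    rw [ssc_go_succ, hd3]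
    simp only [List.isPrefixOf, Bool.false_eq_true, if_false]
    by_cases hcx : c = x
    · simp only [hcx, beq_self_eq_true, if_true]
      push_cast; ring
    · simp only [beq_iff_eq, hcx, if_false]
      exact ssc_go_append_lt (a :: t) x c t.length (by simp)

-- the last-occurrence dict computes exactly string1.rfind(c)
theorem ssc_lastIdx_getD (s : List Char) (c : Char) :
    (sscLastIdx s).getD c (-1) = PySem.Chars.rfind s [c] := by
  induction s using List.reverseRecOn with
  | nil =>
    simp [sscLastIdx, PySem.List.enumerate, PySem.Dict.getD_empty]
    unfold PySem.Chars.rfind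
    simp [ssc_go_zero, List.isPrefixOf]
  | append_singleton t x ih =>
    have henum : PySem.List.enumerate (t ++ [x]) 0
        = PySem.List.enumerate t 0 ++ [((t.length : Int), x)] := by
      rw [PySem.List.enumerate_append]
      simp [PySem.List.enumerate_cons, PySem.List.enumerate_nil]
    have hfold : sscLastIdx (t ++ [x]) = (sscLastIdx t).insert x (t.length : Int) := by
      unfold sscLastIdx
      rw [henum, List.foldl_append]
      rfl
    rw [hfold, PySem.Dict.getD_insert, ssc_rfind_append_singleton, ih]

-- after a successful update A's loop state never changes again
theorem ssc_foldl_stable (rest : List Char) (p : Int) (t : List Char)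
    (h : (t.length : Int) ≤ p) : rest.foldl sscStep (p, t) = (p, t) := by
  induction rest with
  | nil => rfl
  | cons c r ih =>
    have hlt := ssc_rfind_singleton_lt t c
    have : sscStep (p, t) c = (p, t) := by
      rw [sscStep_eq, if_neg (by omega)]
    rw [List.foldl_cons, this, ih]

-- B's scan returns the final last_pos of A's loop
theorem ssc_scan_eq_foldl (s1 : List Char) (r : List Char) :
    sscScan (sscLastIdx s1) r = (r.foldl sscStep (0, s1)).1 := by
  induction r with
  | nil => rfl
  | cons c rest ih =>
    rw [List.foldl_cons]
    show (if (sscLastIdx s1).getD c (-1) > 0 then (sscLastIdx s1).getD c (-1)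
          else sscScan (sscLastIdx s1) rest) = _
    rw [ssc_lastIdx_getD]
    by_cases hpos : PySem.Chars.rfind s1 [c] > 0
    · rw [if_pos hpos]
      have hstep : sscStep (0, s1) c
          = (PySem.Chars.rfind s1 [c], PySem.Chars.slice s1 none (some (PySem.Chars.rfind s1 [c]))) := by
        rw [sscStep_eq, if_pos (by omega)]
      rw [hstep]
      set p := PySem.Chars.rfind s1 [c] with hp
      have hslice : PySem.Chars.slice s1 none (some p) = s1.take p.toNat := by
        rw [PySem.Chars.slice_eq_listSlice, PySem.List.slice_to _ (by omega)]
      have hlen : ((PySem.Chars.slice s1 none (some p)).length : Int) ≤ p := by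
        rw [hslice]
        have : (s1.take p.toNat).length ≤ p.toNat := by simp
        omega
      rw [ssc_foldl_stable rest p _ hlen]
    · rw [if_neg hpos]
      have hstep : sscStep (0, s1) c = (0, s1) := by
        rw [sscStep_eq, if_neg (by omega)]
      rw [hstep, ih]

-- ===== VERDICT (by name: the statement is the Claim_ definition above) =====
theorem special_string_comparison_spec : Claim_equal_special_string_comparison := by
  intro string1 string2 _
  unfold Spec_special_string_comparison special_string_comparison special_string_comparison_alt
  have hrev : (PySem.List.slice? string2.toList none none (-1)).getD [] = string2.toList.reverse := by
    rw [PySem.List.slice?_none_none_neg_one]; rfl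
  simp only [hrev]
  rw [ssc_scan_eq_foldl]
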